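-- pv_equiv track=rewrite | github.com/Ujinkwon/Study | Programmers/1845.py | solution
-- ===== SOURCE A (Python) =====
-- def solution(nums):
--     answer = 0
--     stack = []
--     for i in nums:
--         if i not in stack:
--             stack.append(i)
--     if len(nums) // 2 < len(stack):
--         answer = len(nums) // 2
--     else:
--         answer = len(stack)
--
--     return answer
-- ===== SOURCE B (Python) =====
-- def solution(nums):
--     s = sorted(nums)
--     distinct = 0
--     prev = None
--     for x in s:
--         if prev is None or x != prev:
--             distinct += 1
--         prev = x
--     return min(distinct, len(nums) // 2)
-- ===== Notes on version B (the rewrite author's own statement) =====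
-- stated objective: alternative
-- what changed: Replaces the quadratic membership-scan stack with sort-a-copy followed by a single adjacent-comparison pass counting distinct values, returning min(distinct, len//2).
import Mathlib
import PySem

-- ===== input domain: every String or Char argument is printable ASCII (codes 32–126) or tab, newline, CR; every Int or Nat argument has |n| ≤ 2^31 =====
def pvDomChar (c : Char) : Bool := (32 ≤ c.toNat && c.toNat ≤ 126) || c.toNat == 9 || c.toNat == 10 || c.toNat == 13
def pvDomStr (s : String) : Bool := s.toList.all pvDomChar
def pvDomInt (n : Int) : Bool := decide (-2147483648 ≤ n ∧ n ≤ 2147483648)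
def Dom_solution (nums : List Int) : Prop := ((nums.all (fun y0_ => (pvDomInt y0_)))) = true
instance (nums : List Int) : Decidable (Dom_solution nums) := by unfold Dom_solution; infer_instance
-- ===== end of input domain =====

-- B replaces A's quadratic membership-scan stack by sort-then-adjacent-comparison counting (alternative algorithm, return value identical).

-- ===== PORT A =====
def solution (nums : List Int) : Int :=
  let stack := nums.foldl (fun stack i => if i ∈ stack then stack else stack ++ [i]) ([] : List Int)
  if PySem.Int.floordiv (nums.length : Int) 2 < (stack.length : Int) then
    PySem.Int.floordiv (nums.length : Int) 2
  else (stack.length : Int)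

-- ===== PORT B =====
def solution_alt (nums : List Int) : Int :=
  let s := PySem.List.sorted nums (fun x => x) false
  let st := s.foldl
    (fun (st : Option Int × Int) x =>
      (some x, if st.1 = none ∨ st.1 ≠ some x then st.2 + 1 else st.2))
    ((none : Option Int), (0 : Int))
  min st.2 (PySem.Int.floordiv (nums.length : Int) 2)

-- ===== PRECONDITION & SPEC =====
def Spec_solution (nums : List Int) (out : Int) : Prop := out = solution_alt nums
instance (nums : List Int) (out : Int) : Decidable (Spec_solution nums out) := by unfold Spec_solution; infer_instance

-- ===== CLAIM (what is proved, stated in full; the proofs are below) =====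
def Claim_equal_solution : Prop := ∀ (nums : List Int), Dom_solution nums → Spec_solution nums (solution nums)

-- ===== LEMMAS AND PROOFS =====

-- A's stack: nodup, and its members are exactly the seen elements
theorem stack_invariant (l : List Int) :
    ∀ (s : List Int), s.Nodup →
      (l.foldl (fun stack i => if i ∈ stack then stack else stack ++ [i]) s).Nodup ∧
      (l.foldl (fun stack i => if i ∈ stack then stack else stack ++ [i]) s).toFinset
        = s.toFinset ∪ l.toFinset := by
  induction l with
  | nil => intro s hs; simp [hs]
  | cons x l ih =>
    intro s hs
    by_cases hx : x ∈ s
    · have h := ih s hs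
      simp only [List.foldl_cons, if_pos hx]
      refine ⟨h.1, ?_⟩
      rw [h.2]
      ext y
      simp only [Finset.mem_union, List.mem_toFinset, List.mem_cons]
      constructor
      · rintro (h1 | h2)
        · exact Or.inl h1
        · exact Or.inr (Or.inr h2)
      · rintro (h1 | h2 | h3)
        · exact Or.inl h1
        · exact Or.inl (h2 ▸ hx)
        · exact Or.inr h3
    · have hs' : (s ++ [x]).Nodup := by
        simp only [List.nodup_append, List.nodup_cons, List.not_mem_nil,
          not_false_eq_true, List.nodup_nil, and_true, true_and, hs]
        intro a ha b hb
        simp only [List.mem_singleton] at hb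
        exact fun h => hx ((hb ▸ h) ▸ ha)
      have h := ih (s ++ [x]) hs'
      simp only [List.foldl_cons, if_neg hx]
      refine ⟨h.1, ?_⟩
      rw [h.2]
      ext y
      simp only [Finset.mem_union, List.mem_toFinset, List.mem_append,
        List.mem_cons]
      tauto

theorem stack_card (nums : List Int) :
    (nums.foldl (fun stack i => if i ∈ stack then stack else stack ++ [i]) []).length
      = nums.toFinset.card := by
  have h := stack_invariant nums [] List.nodup_nil
  rw [← List.toFinset_card_of_nodup h.1, h.2]
  simp

theorem card_insert_erase (x : Int) (s : Finset Int) :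
    (insert x s).card = (s.erase x).card + 1 := by
  by_cases hx : x ∈ s
  · rw [Finset.card_insert_of_mem hx, ← Finset.card_erase_add_one hx]
  · rw [Finset.card_insert_of_notMem hx, Finset.erase_eq_of_notMem hx]

-- B's pass, after the first element: prev = p, everything still ahead is ≥ p
theorem count_aux (l : List Int) :
    ∀ (p n : Int), l.Pairwise (· ≤ ·) → (∀ y ∈ l, p ≤ y) →
      (l.foldl
        (fun (st : Option Int × Int) x =>
          (some x, if st.1 = none ∨ st.1 ≠ some x then st.2 + 1 else st.2))
        (some p, n)).2 = n + ((l.toFinset).erase p).card := by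
  induction l with
  | nil => intro p n _ _; simp
  | cons x l ih =>
    intro p n hpw hge
    have hxl : ∀ y ∈ l, x ≤ y := (List.pairwise_cons.mp hpw).1
    have hlw : l.Pairwise (· ≤ ·) := (List.pairwise_cons.mp hpw).2
    have hpx : p ≤ x := hge x (List.mem_cons_self)
    by_cases hxp : x = p
    · subst hxp
      simp only [List.foldl_cons, List.toFinset_cons]
      have : ¬ ((some x : Option Int) = none ∨ (some x : Option Int) ≠ some x) := by simp
      rw [if_neg this]
      rw [ih x n hlw hxl, Finset.erase_insert_eq_erase]
    · have hplt : ∀ y ∈ l, p < y := fun y hy => lt_of_lt_of_le (lt_of_le_of_ne hpx fun h => hxp h.symm) (hxl y hy)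
      have hpnl : p ∉ l.toFinset := by
        simp only [List.mem_toFinset]
        intro hc; exact absurd rfl (hplt p hc).ne
      simp only [List.foldl_cons, List.toFinset_cons]
      have hcond : ((some p : Option Int) = none ∨ (some p : Option Int) ≠ some x) := by
        right; intro h; exact hxp (Option.some.inj h).symm
      rw [if_pos hcond, ih x (n + 1) hlw hxl]
      have hne : p ∉ insert x l.toFinset := by
        simp only [Finset.mem_insert]
        rintro (h | h)
        · exact hxp h.symm
        · exact hpnl h
      rw [Finset.erase_eq_of_notMem hne]
      rw [card_insert_erase]
      push_cast
      ring

theorem count_sorted (l : List Int) (hpw : l.Pairwise (· ≤ ·)) :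
    (l.foldl
      (fun (st : Option Int × Int) x =>
        (some x, if st.1 = none ∨ st.1 ≠ some x then st.2 + 1 else st.2))
      ((none : Option Int), (0 : Int))).2 = l.toFinset.card := by
  cases l with
  | nil => simp
  | cons x l =>
    have hxl : ∀ y ∈ l, x ≤ y := (List.pairwise_cons.mp hpw).1
    have hlw : l.Pairwise (· ≤ ·) := (List.pairwise_cons.mp hpw).2
    simp only [List.foldl_cons, List.toFinset_cons, ne_eq, true_or, if_true, zero_add]
    rw [count_aux l x 1 hlw hxl]
    rw [card_insert_erase]
    push_cast
    ring

-- ===== VERDICT (by name: the statement is the Claim_ definition above) =====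
theorem solution_spec : Claim_equal_solution := by
  intro nums _
  unfold Spec_solution solution solution_alt
  have hperm : (PySem.List.sorted nums (fun x => x) false).Perm nums := PySem.List.sorted_perm nums _ _
  have hpw : (PySem.List.sorted nums (fun x => x) false).Pairwise (· ≤ ·) :=
    PySem.List.sorted_pairwise nums _
  have hB := count_sorted _ hpw
  have hfs : (PySem.List.sorted nums (fun x => x) false).toFinset = nums.toFinset := by
    ext y; simp only [List.mem_toFinset]; exact hperm.mem_iff
  rw [hfs] at hB
  have hA := stack_card nums
  simp only [hB, hA]
  set q := PySem.Int.floordiv (nums.length : Int) 2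
  set c := (nums.toFinset.card : Int)
  by_cases h : q < c
  · rw [if_pos h]; omega
  · rw [if_neg h]; omega
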